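-- pv_equiv track=rewrite | github.com/FeltsAzn/Karat_prices | parser/parser.py | products_cards
-- ===== SOURCE A (Python) =====
-- def products_cards(names: list, prices: list) -> dict:
--     """Function for combining the name and price of the product"""
--
--     assert isinstance(names, list) and isinstance(prices, list), 'Ошибка списков!'
--     products = {}
--     for name, price in sorted(zip(names, prices), key=lambda x: x[0]):
--         if price:
--             products[name] = price
--         else:
--             products[name] = 0
--     return products
-- ===== SOURCE B (Python) =====
-- def products_cards(names: list, prices: list) -> dict:
--     """Function for combining the name and price of the product"""
--
--     assert isinstance(names, list) and isinstance(prices, list), 'Ошибка списков!'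
--     latest = {}
--     seen = set()
--     for name, price in reversed(list(zip(names, prices))):
--         if name not in seen:
--             seen.add(name)
--             latest[name] = price if price else 0
--     return {name: latest[name] for name in sorted(latest)}
-- ===== Notes on version B (the rewrite author's own statement) =====
-- stated objective: alternative
-- what changed: B replaces A's sort-all-pairs-then-overwrite-fold with a single back-to-front scan that keeps only the first price seen per name via a seen-set (first-wins = A's last-write-wins), then emits the deduplicated table in sorted key order.
import Mathlib
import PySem

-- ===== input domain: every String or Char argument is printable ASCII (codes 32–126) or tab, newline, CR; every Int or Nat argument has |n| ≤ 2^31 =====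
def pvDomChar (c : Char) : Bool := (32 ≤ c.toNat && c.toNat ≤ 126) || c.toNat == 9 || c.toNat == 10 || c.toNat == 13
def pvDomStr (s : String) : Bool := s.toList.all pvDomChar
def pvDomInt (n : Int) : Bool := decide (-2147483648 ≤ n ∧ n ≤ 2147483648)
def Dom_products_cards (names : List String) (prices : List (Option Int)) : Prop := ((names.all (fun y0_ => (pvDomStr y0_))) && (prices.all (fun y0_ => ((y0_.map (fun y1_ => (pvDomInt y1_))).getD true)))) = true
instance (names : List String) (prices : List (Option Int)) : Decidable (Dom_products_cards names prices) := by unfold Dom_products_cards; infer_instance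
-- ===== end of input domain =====

-- B scans the zipped pairs BACK-TO-FRONT once, keeping only the first price seen per name
-- (= the last occurrence in the original order) via a seen-set, then emits the table in
-- sorted key order — instead of A's sort-all-pairs-then-overwrite-fold (alternative algorithm).

-- ===== PORT A =====
-- sorted(zip(names, prices), key=lambda x: x[0]); 'if price:' on an Optional[int] is truthy iff
-- the value is a non-None non-zero int, i.e. np.2.getD 0 ≠ 0.
def products_cards (names : List String) (prices : List (Option Int)) : List (String × Int) :=
  ((PySem.List.sorted (names.zip prices) (fun x => x.1) false).foldl
    (fun products np =>
      if np.2.getD 0 ≠ 0 then products.insert np.1 (np.2.getD 0)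
      else products.insert np.1 0)
    PySem.Dict.empty).items

-- ===== PORT B =====
-- reversed(list(zip(names, prices))) with a seen-set; 'price if price else 0' as in A's truthiness;
-- 'latest[name]' in the final comprehension is ported as getD _ 0 — exact, since every key of
-- sorted(latest) is a key of latest (no KeyError is reachable).
def products_cards_alt (names : List String) (prices : List (Option Int)) : List (String × Int) :=
  let sr := (names.zip prices).reverse.foldl
    (fun (st : PySem.Set String × PySem.Dict String Int) np =>
      if np.1 ∈ st.1 then st
      else (PySem.Set.add st.1 np.1,
            st.2.insert np.1 (if np.2.getD 0 ≠ 0 then np.2.getD 0 else 0)))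
    (PySem.Set.empty, PySem.Dict.empty)
  ((PySem.List.sorted sr.2.keys (fun k => k) false).foldl
    (fun d k => d.insert k (sr.2.getD k 0)) PySem.Dict.empty).items

-- ===== PRECONDITION & SPEC =====
def Spec_products_cards (names : List String) (prices : List (Option Int)) (out : List (String × Int)) : Prop := out = products_cards_alt names prices
instance (names : List String) (prices : List (Option Int)) (out : List (String × Int)) : Decidable (Spec_products_cards names prices out) := by unfold Spec_products_cards; infer_instance

-- ===== CLAIM (what is proved, stated in full; the proofs are below) =====
def Claim_equal_products_cards : Prop := ∀ (names : List String) (prices : List (Option Int)), Dom_products_cards names prices → Spec_products_cards names prices (products_cards names prices)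

-- ===== LEMMAS AND PROOFS =====

-- A's per-pair step: both branches insert np.2.getD 0 at key np.1
theorem pc_stepA_eq (d : PySem.Dict String Int) (p : String × Option Int) :
    (if p.2.getD 0 ≠ 0 then d.insert p.1 (p.2.getD 0) else d.insert p.1 0)
      = d.insert p.1 (p.2.getD 0) := by
  split_ifs with h
  · rfl
  · rw [not_ne_iff] at h
    rw [h]

theorem pc_stepB_eq (p : String × Option Int) :
    (if p.2.getD 0 ≠ 0 then p.2.getD 0 else 0) = p.2.getD 0 := by
  split_ifs with h
  · rfl
  · rw [not_ne_iff] at h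
    rw [h]

-- the price A's dict finally holds for key k: the LAST pair with that key (falsy → 0)
def pcLast : List (String × Option Int) → String → Option Int
  | [], _ => none
  | p :: t, k =>
    match pcLast t k with
    | some v => some v
    | none => if p.1 = k then some (p.2.getD 0) else none

-- the FIRST pair with key k (what B's first-wins reverse scan stores)
def pcFirst : List (String × Option Int) → String → Option Int
  | [], _ => none
  | p :: t, k => if p.1 = k then some (p.2.getD 0) else pcFirst t k

theorem pc_pcFirst_append (a b : List (String × Option Int)) (k : String) :
    pcFirst (a ++ b) k =
      match pcFirst a k with
      | some v => some v
      | none => pcFirst b k := by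
  induction a with
  | nil => simp [pcFirst]
  | cons p t ih =>
    simp only [List.cons_append, pcFirst]
    by_cases h : p.1 = k
    · simp [h]
    · simp [h, ih]

theorem pc_pcFirst_reverse (l : List (String × Option Int)) (k : String) :
    pcFirst l.reverse k = pcLast l k := by
  induction l with
  | nil => rfl
  | cons p t ih =>
    rw [List.reverse_cons, pc_pcFirst_append, ih]
    show _ = pcLast (p :: t) k
    simp only [pcLast, pcFirst]

theorem pc_get?_fold (l : List (String × Option Int)) : ∀ (d : PySem.Dict String Int) (k : String),
    (l.foldl (fun d p => d.insert p.1 (p.2.getD 0)) d).get? k =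
      match pcLast l k with
      | some v => some v
      | none => d.get? k := by
  induction l with
  | nil => intro d k; simp [pcLast]
  | cons a l ih =>
    intro d k
    rw [List.foldl_cons, ih]
    show _ = (match pcLast (a :: l) k with | some v => some v | none => d.get? k)
    simp only [pcLast]
    cases hfl : pcLast l k with
    | some v => rfl
    | none =>
      rw [PySem.Dict.get?_insert]
      by_cases hk : a.1 = k
      · simp [hk]
      · have hk' : ¬ k = a.1 := fun h => hk h.symm
        simp [hk, hk']

-- pcLast only looks at the pairs whose key is k
theorem pc_pcLast_filter (k : String) (l : List (String × Option Int)) :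
    pcLast l k = pcLast (l.filter (fun p => p.1 == k)) k := by
  induction l with
  | nil => rfl
  | cons a l ih =>
    by_cases hk : a.1 = k
    · rw [List.filter_cons_of_pos (by simp [hk])]
      simp only [pcLast, ← ih]
    · rw [List.filter_cons_of_neg (by simp [hk])]
      simp only [pcLast, ← ih, hk, if_false]
      cases pcLast l k <;> rfl

-- ----- stability of PySem's insertion sort on the key-k class -----

theorem pc_filter_insertBy_pos (k : String) (x : String × Option Int)
    (ys : List (String × Option Int)) (hx : x.1 = k)
    (h : ys.Pairwise (fun a b => a.1 ≤ b.1)) :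
    (PySem.List.insertBy (fun a b => decide (a.1 < b.1)) x ys).filter (fun p => p.1 == k)
      = ys.filter (fun p => p.1 == k) ++ [x] := by
  induction ys with
  | nil => simp [PySem.List.insertBy, hx]
  | cons y ys ih =>
    rw [List.pairwise_cons] at h
    simp only [PySem.List.insertBy, decide_eq_true_eq]
    by_cases hb : x.1 < y.1
    · rw [if_pos hb]
      have hkl : k < y.1 := hx ▸ hb
      have hnil : (y :: ys).filter (fun p => p.1 == k) = [] := by
        rw [List.filter_eq_nil_iff]
        intro z hz
        rcases List.mem_cons.mp hz with rfl | hz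
        · simp [(ne_of_gt hkl)]
        · simp [ne_of_gt (lt_of_lt_of_le hkl (h.1 z hz))]
      rw [List.filter_cons_of_pos (by simp [hx]), hnil]
      simp
    · rw [if_neg hb]
      by_cases hy : y.1 = k
      · rw [List.filter_cons_of_pos (by simp [hy]), List.filter_cons_of_pos (by simp [hy]),
          ih h.2, List.cons_append]
      · rw [List.filter_cons_of_neg (by simp [hy]), List.filter_cons_of_neg (by simp [hy]),
          ih h.2]

theorem pc_filter_insertBy_neg (k : String) (x : String × Option Int)
    (ys : List (String × Option Int)) (hx : x.1 ≠ k) :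
    (PySem.List.insertBy (fun a b => decide (a.1 < b.1)) x ys).filter (fun p => p.1 == k)
      = ys.filter (fun p => p.1 == k) := by
  induction ys with
  | nil => simp [PySem.List.insertBy, hx]
  | cons y ys ih =>
    simp only [PySem.List.insertBy, decide_eq_true_eq]
    by_cases hb : x.1 < y.1
    · rw [if_pos hb, List.filter_cons_of_neg (by simp [hx])]
    · rw [if_neg hb]
      by_cases hy : y.1 = k
      · rw [List.filter_cons_of_pos (by simp [hy]), List.filter_cons_of_pos (by simp [hy]), ih]
      · rw [List.filter_cons_of_neg (by simp [hy]), List.filter_cons_of_neg (by simp [hy]), ih]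

theorem pc_fold_insertBy_filter (k : String) (l : List (String × Option Int)) :
    ∀ acc : List (String × Option Int), acc.Pairwise (fun a b => a.1 ≤ b.1) →
      (l.foldl (fun a x => PySem.List.insertBy (fun a b => decide (a.1 < b.1)) x a) acc).filter
          (fun p => p.1 == k)
        = acc.filter (fun p => p.1 == k) ++ l.filter (fun p => p.1 == k) := by
  induction l with
  | nil => intro acc _; simp
  | cons x l ih =>
    intro acc hacc
    rw [List.foldl_cons, ih _ (PySem.List.insertBy_pairwise_le (fun p => p.1) x acc hacc)]
    by_cases hx : x.1 = k
    · rw [pc_filter_insertBy_pos k x acc hx hacc, List.filter_cons_of_pos (by simp [hx])]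
      simp
    · rw [pc_filter_insertBy_neg k x acc hx, List.filter_cons_of_neg (by simp [hx])]

theorem pc_sorted_filter (l : List (String × Option Int)) (k : String) :
    (PySem.List.sorted l (fun p => p.1) false).filter (fun p => p.1 == k)
      = l.filter (fun p => p.1 == k) := by
  rw [PySem.List.sorted_eq_foldl_insertBy]
  simpa using pc_fold_insertBy_filter k l [] (by simp)

-- ----- set-of-keys facts for A's dict -----

theorem pc_foldl_add_sublist (l : List String) :
    ∀ acc : List String, ∃ t, l.foldl PySem.Set.add acc = acc ++ t ∧ t.Sublist l := by
  induction l with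
  | nil => intro acc; exact ⟨[], by simp, by simp⟩
  | cons x l ih =>
    intro acc
    rw [List.foldl_cons]
    by_cases hc : x ∈ acc
    · have hadd : PySem.Set.add acc x = acc := by simp [PySem.Set.add, hc]
      obtain ⟨t, h1, h2⟩ := ih acc
      rw [hadd]
      exact ⟨t, h1, h2.cons x⟩
    · have hadd : PySem.Set.add acc x = acc ++ [x] := by simp [PySem.Set.add, hc]
      obtain ⟨t, h1, h2⟩ := ih (acc ++ [x])
      rw [hadd, h1]
      exact ⟨x :: t, by simp, h2.cons₂ x⟩

theorem pc_ofList_sublist (l : List String) : (PySem.Set.ofList l).Sublist l := by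
  obtain ⟨t, h1, h2⟩ := pc_foldl_add_sublist l []
  rw [PySem.Set.ofList_eq_foldl, h1]
  simpa using h2

theorem pc_ofList_pairwise_lt (l : List String) (h : l.Pairwise (· ≤ ·)) :
    (PySem.Set.ofList l).Pairwise (· < ·) := by
  have hle : (PySem.Set.ofList l).Pairwise (· ≤ ·) := h.sublist (pc_ofList_sublist l)
  have hnd : (PySem.Set.ofList l).Pairwise (· ≠ ·) := PySem.Set.nodup_ofList l
  exact (hle.and hnd).imp (fun hab => lt_of_le_of_ne hab.1 hab.2)

-- ----- B's first-wins reverse scan: characterization of the table -----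

theorem pc_fold_fw (m : List (String × Option Int)) :
    ∀ (s : PySem.Set String) (d : PySem.Dict String Int), s = d.keys → d.keys.Nodup →
      (∀ k, (m.foldl (fun (st : PySem.Set String × PySem.Dict String Int) p =>
            if p.1 ∈ st.1 then st
            else (PySem.Set.add st.1 p.1, st.2.insert p.1 (p.2.getD 0))) (s, d)).2.get? k =
          if k ∈ s then d.get? k
          else match pcFirst m k with | some v => some v | none => d.get? k)
      ∧ (m.foldl (fun (st : PySem.Set String × PySem.Dict String Int) p =>
            if p.1 ∈ st.1 then st
            else (PySem.Set.add st.1 p.1, st.2.insert p.1 (p.2.getD 0))) (s, d)).2.keys.Nodup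
      ∧ (∀ k, k ∈ (m.foldl (fun (st : PySem.Set String × PySem.Dict String Int) p =>
            if p.1 ∈ st.1 then st
            else (PySem.Set.add st.1 p.1, st.2.insert p.1 (p.2.getD 0))) (s, d)).2.keys
          ↔ k ∈ d.keys ∨ k ∈ m.map Prod.fst) := by
  induction m with
  | nil =>
    intro s d hs hnd
    refine ⟨fun k => ?_, hnd, fun k => by simp⟩
    simp only [List.foldl_nil, pcFirst]
    split_ifs <;> rfl
  | cons p t ih =>
    intro s d hs hnd
    by_cases hp : p.1 ∈ s
    · rw [List.foldl_cons, if_pos hp]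
      obtain ⟨hget, hnd', hmem⟩ := ih s d hs hnd
      refine ⟨fun k => ?_, hnd', fun k => ?_⟩
      · rw [hget k]
        by_cases hks : k ∈ s
        · rw [if_pos hks, if_pos hks]
        · rw [if_neg hks, if_neg hks]
          have hne : p.1 ≠ k := fun h => hks (h ▸ hp)
          simp only [pcFirst, hne, if_false]
      · rw [hmem k, List.map_cons]
        have hpk : p.1 ∈ d.keys := hs ▸ hp
        constructor
        · rintro (h | h)
          · exact Or.inl h
          · exact Or.inr (List.mem_cons_of_mem _ h)
        · rintro (h | h)
          · exact Or.inl h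
          · rcases List.mem_cons.mp h with h' | h'
            · exact Or.inl (h' ▸ hpk)
            · exact Or.inr h'
    · have hcont : d.contains p.1 = false := by
        rw [PySem.Dict.contains_eq_decide_mem_keys]
        simp [show p.1 ∉ d.keys from hs ▸ hp]
      have hkeys : (d.insert p.1 (p.2.getD 0)).keys = d.keys ++ [p.1] :=
        PySem.Dict.keys_insert_of_not_contains d (p.2.getD 0) hcont
      have hadd : PySem.Set.add s p.1 = s ++ [p.1] := by simp [PySem.Set.add, hp]
      have hs' : PySem.Set.add s p.1 = (d.insert p.1 (p.2.getD 0)).keys := by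
        rw [hadd, hkeys, hs]
      have hnd' : (d.insert p.1 (p.2.getD 0)).keys.Nodup := by
        rw [hkeys]
        have hnp : p.1 ∉ d.keys := hs ▸ hp
        simp only [List.nodup_append, List.nodup_cons, List.nodup_nil]
        refine ⟨hnd, by simp, ?_⟩
        intro x hx y hy
        rw [List.mem_singleton] at hy
        subst hy
        exact fun h => hnp (h ▸ hx)
      rw [List.foldl_cons, if_neg hp]
      obtain ⟨hget, hnd'', hmem⟩ := ih _ _ hs' hnd'
      refine ⟨fun k => ?_, hnd'', fun k => ?_⟩
      · rw [hget k, hadd]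
        by_cases hks : k ∈ s
        · have hne : k ≠ p.1 := fun h => hp (h ▸ hks)
          rw [if_pos (by simp [hks]), if_pos hks, PySem.Dict.get?_insert, if_neg hne]
        · by_cases hkp : k = p.1
          · rw [if_pos (by simp [hkp]), if_neg hks]
            subst hkp
            simp [pcFirst, PySem.Dict.get?_insert_self]
          · rw [if_neg (by simp [hks, hkp]), if_neg hks]
            have hne : p.1 ≠ k := fun h => hkp h.symm
            simp only [pcFirst, hne, if_false]
            cases pcFirst t k with
            | some v => rfl
            | none => simp only; rw [PySem.Dict.get?_insert, if_neg hkp]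
      · rw [hmem k, hkeys]
        simp only [List.mem_append, List.map_cons, List.mem_cons]
        tauto

-- ----- main equality -----

theorem pc_main (names : List String) (prices : List (Option Int)) :
    products_cards names prices = products_cards_alt names prices := by
  have hfA : (fun (d : PySem.Dict String Int) (np : String × Option Int) =>
      if np.2.getD 0 ≠ 0 then d.insert np.1 (np.2.getD 0) else d.insert np.1 0)
      = fun d np => d.insert np.1 (np.2.getD 0) := by
    funext d np; exact pc_stepA_eq d np
  have hfB : (fun (st : PySem.Set String × PySem.Dict String Int) (np : String × Option Int) =>
      if np.1 ∈ st.1 then st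
      else (PySem.Set.add st.1 np.1, st.2.insert np.1 (if np.2.getD 0 ≠ 0 then np.2.getD 0 else 0)))
      = fun st np => if np.1 ∈ st.1 then st
          else (PySem.Set.add st.1 np.1, st.2.insert np.1 (np.2.getD 0)) := by
    funext st np; rw [pc_stepB_eq np]
  unfold products_cards products_cards_alt
  rw [hfA]
  simp only [hfB]
  set pairs := names.zip prices with hpairs
  set sp := PySem.List.sorted pairs (fun x => x.1) false with hsp
  set dA := sp.foldl (fun d np => d.insert np.1 (np.2.getD 0)) PySem.Dict.empty with hdA
  set res := (pairs.reverse.foldl (fun (st : PySem.Set String × PySem.Dict String Int) p =>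
      if p.1 ∈ st.1 then st
      else (PySem.Set.add st.1 p.1, st.2.insert p.1 (p.2.getD 0)))
      (PySem.Set.empty, PySem.Dict.empty)).2 with hres
  obtain ⟨hget, hndB, hmemB⟩ := pc_fold_fw pairs.reverse PySem.Set.empty PySem.Dict.empty
      (by rw [PySem.Dict.keys_empty]; rfl) (PySem.Dict.nodup_keys_empty)
  -- B's table holds the last-occurrence value
  have hresget : ∀ k, res.get? k = pcLast pairs k := by
    intro k
    rw [hres, hget k]
    have : (k ∈ (PySem.Set.empty : PySem.Set String)) = False := by
      simp [PySem.Set.empty]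
    rw [if_neg (by simp [PySem.Set.empty])]
    rw [pc_pcFirst_reverse]
    cases pcLast pairs k with
    | some v => rfl
    | none => simp [PySem.Dict.get?_empty]
  -- A's dict lookups are the same last-occurrence values (stability of the sort)
  have hdAget : ∀ k, dA.get? k = pcLast pairs k := by
    intro k
    rw [hdA, pc_get?_fold]
    have hstab : pcLast sp k = pcLast pairs k := by
      rw [pc_pcLast_filter, hsp, pc_sorted_filter, ← pc_pcLast_filter]
    rw [hstab]
    cases pcLast pairs k with
    | some v => rfl
    | none => simp [PySem.Dict.get?_empty]
  have hgetD : ∀ k, res.getD k 0 = dA.getD k 0 := by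
    intro k
    rw [PySem.Dict.getD_eq_get?_getD, PySem.Dict.getD_eq_get?_getD, hresget k, hdAget k]
  -- A's keys: sorted, distinct
  have hndA : dA.keys.Nodup := by
    rw [hdA]
    exact PySem.Dict.nodup_keys_foldl_insert_key sp (fun np => np.1) (fun d np => np.2.getD 0)
      PySem.Dict.empty PySem.Dict.nodup_keys_empty
  have hkA : dA.keys = PySem.Set.ofList (sp.map (fun p => p.1)) := by
    rw [hdA, PySem.Dict.keys_foldl_insert_key, PySem.Dict.keys_empty, PySem.Set.ofList_eq_foldl]
    rfl
  have hpwK : dA.keys.Pairwise (· < ·) := by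
    rw [hkA]
    exact pc_ofList_pairwise_lt _ (PySem.List.sorted_map_key_pairwise pairs (fun p => p.1))
  -- same key sets → sorting B's keys gives exactly A's key list
  have hpermK : dA.keys.Perm res.keys := by
    refine (List.perm_ext_iff_of_nodup hndA (hres ▸ hndB)).mpr (fun k => ?_)
    rw [hkA, hres, hmemB k, PySem.Set.mem_ofList, List.mem_map, PySem.Dict.keys_empty]
    constructor
    · rintro ⟨p, hp, rfl⟩
      right
      rw [List.map_reverse, List.mem_reverse]
      exact List.mem_map.mpr ⟨p, (PySem.List.mem_sorted pairs (fun x => x.1) false p).mp hp, rfl⟩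
    · rintro (h | h)
      · exact absurd h (List.not_mem_nil)
      · rw [List.map_reverse, List.mem_reverse] at h
        obtain ⟨p, hp, rfl⟩ := List.mem_map.mp h
        exact ⟨p, (PySem.List.mem_sorted pairs (fun x => x.1) false p).mpr hp, rfl⟩
  have hsortK : PySem.List.sorted res.keys (fun k => k) false = dA.keys :=
    PySem.List.sorted_eq_of_perm_of_pairwise_lt res.keys dA.keys (fun k => k) hpermK hpwK
  -- B's final dict: fresh distinct keys in sorted order → items are key↦value pairs in that order
  show dA.items = ((PySem.List.sorted res.keys (fun k => k) false).foldl
      (fun d k => d.insert k (res.getD k 0)) PySem.Dict.empty).items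
  rw [hsortK]
  have hfresh := PySem.Dict.items_foldl_insert_fresh (l := dA.keys) (k := fun x => x)
      (v := fun x => res.getD x 0) (d := PySem.Dict.empty)
      (by intro a _; exact PySem.Dict.contains_empty a) (by simpa using hndA)
  rw [hfresh]
  have hempty : (PySem.Dict.empty : PySem.Dict String Int).items = [] := rfl
  rw [hempty, List.nil_append]
  have hitemsA : dA.items = dA.keys.map (fun k => (k, dA.getD k 0)) :=
    PySem.Dict.items_eq_map_keys dA hndA 0
  rw [hitemsA]
  exact List.map_congr_left (fun k _ => by simp only [hgetD k])

-- ===== VERDICT (by name: the statement is the Claim_ definition above) =====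
theorem products_cards_spec : Claim_equal_products_cards := by
  unfold Claim_equal_products_cards
  intro names prices _
  unfold Spec_products_cards
  exact pc_main names prices
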